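-- pv_equiv track=rewrite | github.com/NVIDIA-NeMo/Safe-Synthesizer | script/slurm/collect_nss_results.py | classify_incomplete_status
-- ===== SOURCE A (Python) =====
-- from typing import Optional
--
-- def _safe_lower(text: Optional[str]) -> str:
--     return (text or "").lower()
--
-- def classify_incomplete_status(err_text: str) -> str:
--     """Classify an incomplete job as ERROR or IN_PROGRESS using the .err content.
--
--     Heuristics:
--       - If error signatures are present, return "ERROR".
--       - Otherwise, return "IN_PROGRESS".
--     """
--     if not err_text:
--         return "IN_PROGRESS"
--
--     lowered = _safe_lower(err_text)
--     error_tokens = [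
--         "traceback (most recent call last):",
--         "error:",
--         "exception",
--         "runtimeerror",
--         "valueerror",
--         "keyerror",
--         "memoryerror",
--         "segmentation fault",
--         "killed",
--         "exited with exit code",
--         "nccl error",
--         "cuda error",
--         "oom",
--         "out of memory",
--     ]
--     if any(tok in lowered for tok in error_tokens):
--         return "ERROR"
--     return "IN_PROGRESS"
-- ===== SOURCE B (Python) =====
-- _ERROR_TOKENS = (
--     "traceback (most recent call last):",
--     "error:",
--     "exception",
--     "runtimeerror",
--     "valueerror",
--     "keyerror",
--     "memoryerror",
--     "segmentation fault",
--     "killed",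
--     "exited with exit code",
--     "nccl error",
--     "cuda error",
--     "oom",
--     "out of memory",
-- )
--
--
-- def classify_incomplete_status(err_text: str) -> str:
--     """Single position-driven pass: at each index, test whether any error
--     token starts there, instead of one full substring scan per token."""
--     if not err_text:
--         return "IN_PROGRESS"
--     lowered = err_text.lower()
--     for i in range(len(lowered)):
--         for tok in _ERROR_TOKENS:
--             if lowered.startswith(tok, i):
--                 return "ERROR"
--     return "IN_PROGRESS"
-- ===== Notes on version B (the rewrite author's own statement) =====
-- stated objective: alternative
-- what changed: A runs fourteen independent whole-string substring containment scans, one per error token; B makes a single position-driven pass over the lowered text, testing at each index whether any error token starts there.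
import Mathlib
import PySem

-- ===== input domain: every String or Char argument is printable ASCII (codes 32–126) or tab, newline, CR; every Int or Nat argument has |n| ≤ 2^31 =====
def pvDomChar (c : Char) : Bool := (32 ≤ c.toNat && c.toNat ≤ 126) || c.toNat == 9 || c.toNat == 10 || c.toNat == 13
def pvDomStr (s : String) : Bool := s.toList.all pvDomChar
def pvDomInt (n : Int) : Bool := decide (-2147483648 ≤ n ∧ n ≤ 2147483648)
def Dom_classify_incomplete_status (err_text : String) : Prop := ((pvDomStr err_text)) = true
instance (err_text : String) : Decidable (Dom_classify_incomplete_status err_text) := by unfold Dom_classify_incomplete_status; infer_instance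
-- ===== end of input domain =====

-- B replaces A's fourteen independent substring scans by one position-driven pass testing each token as a prefix (objective: alternative).

-- ===== PORT A =====
-- helper _safe_lower(text): (text or "").lower()
def pySafeLower (text : Option String) : String :=
  PySem.Str.lower (match text with
    | none => ""
    | some s => if PySem.Str.len s == 0 then "" else s)

def pvErrorTokens : List String :=
  ["traceback (most recent call last):", "error:", "exception", "runtimeerror",
   "valueerror", "keyerror", "memoryerror", "segmentation fault", "killed",
   "exited with exit code", "nccl error", "cuda error", "oom", "out of memory"]

def classify_incomplete_status (err_text : String) : String :=
  if PySem.Str.len err_text == 0 then "IN_PROGRESS"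
  else
    let lowered := pySafeLower (some err_text)
    if pvErrorTokens.any (fun tok => PySem.Str.isIn tok lowered) then "ERROR"
    else "IN_PROGRESS"

-- ===== PORT B =====
-- the same token set, as char lists (Source B's _ERROR_TOKENS)
def pvErrorTokensB : List (List Char) := pvErrorTokens.map String.toList

-- Source B's 'for i in range(len(lowered))' loop: recursion over the suffixes of lowered
def pvScan (cs : List Char) : Bool :=
  match cs with
  | [] => false
  | c :: rest =>
      if pvErrorTokensB.any (fun tok => PySem.Chars.startswith (c :: rest) tok) then true
      else pvScan rest

def classify_incomplete_status_alt (err_text : String) : String :=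
  if PySem.Str.len err_text == 0 then "IN_PROGRESS"
  else if pvScan (PySem.Chars.lower err_text.toList) then "ERROR"
  else "IN_PROGRESS"

-- ===== PRECONDITION & SPEC =====
def Spec_classify_incomplete_status (err_text : String) (out : String) : Prop := out = classify_incomplete_status_alt err_text
instance (err_text : String) (out : String) : Decidable (Spec_classify_incomplete_status err_text out) := by unfold Spec_classify_incomplete_status; infer_instance

-- ===== CLAIM (what is proved, stated in full; the proofs are below) =====
def Claim_equal_classify_incomplete_status : Prop := ∀ (err_text : String), Dom_classify_incomplete_status err_text → Spec_classify_incomplete_status err_text (classify_incomplete_status err_text)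

-- ===== LEMMAS AND PROOFS =====

-- every token in B's list is nonempty
lemma pvErrorTokensB_ne_nil : ∀ tok ∈ pvErrorTokensB, tok ≠ [] := by decide

-- the position scan decides "some token is an infix"
lemma pvScan_iff (cs : List Char) :
    pvScan cs = true ↔ ∃ tok ∈ pvErrorTokensB, tok <:+: cs := by
  induction cs with
  | nil =>
      simp only [pvScan, List.infix_nil, Bool.false_eq_true, false_iff]
      rintro ⟨tok, htok, rfl⟩
      exact pvErrorTokensB_ne_nil [] htok rfl
  | cons c rest ih =>
      rw [pvScan]
      split_ifs with h
      · simp only [true_iff]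
        rcases List.any_eq_true.mp h with ⟨tok, htok, hsw⟩
        exact ⟨tok, htok, (PySem.Chars.startswith_iff _ _).mp hsw |>.isInfix⟩
      · rw [ih]
        constructor
        · rintro ⟨tok, htok, hinf⟩; exact ⟨tok, htok, hinf.trans (List.suffix_cons c rest).isInfix⟩
        · rintro ⟨tok, htok, hinf⟩
          rcases List.infix_cons_iff.mp hinf with hpre | hinf'
          · exact absurd (List.any_eq_true.mpr ⟨tok, htok, (PySem.Chars.startswith_iff _ _).mpr hpre⟩) h
          · exact ⟨tok, htok, hinf'⟩

-- A's token-by-token 'tok in lowered' test equals B's scan, on the lowered text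
lemma any_isIn_eq_pvScan (s : String) :
    pvErrorTokens.any (fun tok => PySem.Str.isIn tok s) = pvScan s.toList := by
  by_cases h : pvScan s.toList = true
  · rw [h]
    rcases (pvScan_iff _).mp h with ⟨tok, htok, hinf⟩
    rcases List.mem_map.mp htok with ⟨t, ht, rfl⟩
    exact List.any_eq_true.mpr ⟨t, ht, (PySem.Str.isIn_iff_infix t s).mpr hinf⟩
  · rw [Bool.not_eq_true] at h
    rw [h, Bool.eq_false_iff]
    intro hany
    rcases List.any_eq_true.mp hany with ⟨tok, htok, hin⟩
    have hmem : ∃ t ∈ pvErrorTokensB, t <:+: s.toList :=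
      ⟨tok.toList, List.mem_map_of_mem htok, (PySem.Str.isIn_iff_infix tok s).mp hin⟩
    rw [← pvScan_iff, h] at hmem
    exact Bool.false_ne_true hmem

-- ===== VERDICT (by name: the statement is the Claim_ definition above) =====
theorem classify_incomplete_status_spec : Claim_equal_classify_incomplete_status := by
  intro err_text _
  unfold Spec_classify_incomplete_status classify_incomplete_status classify_incomplete_status_alt
  by_cases h0 : (PySem.Str.len err_text == 0) = true
  · rw [if_pos h0, if_pos h0]
  · have hne : err_text ≠ "" := by intro e; subst e; exact h0 (by decide)
    have hlow : pySafeLower (some err_text) = PySem.Str.lower err_text := by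
      simp [pySafeLower, hne]
    have hcond : (pvErrorTokens.any fun tok => PySem.Str.isIn tok (pySafeLower (some err_text)))
        = pvScan (PySem.Chars.lower err_text.toList) := by
      rw [hlow, any_isIn_eq_pvScan, PySem.Str.toList_lower]
    rw [if_neg h0, if_neg h0]
    show (if (pvErrorTokens.any fun tok => PySem.Str.isIn tok (pySafeLower (some err_text))) = true
        then "ERROR" else "IN_PROGRESS") = _
    rw [hcond]
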